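-- pv_equiv track=rewrite | github.com/songyh314/nwc_ntt_python | tool.py | naiveConvModQ
-- ===== SOURCE A (Python) =====
-- def getLowBits(din, bitLen):
--     """
--         截取输入二进制的低bitLen位
--         :param din: input unsigned/signed
--         :param bitLen: 截取的位数
--         :return: 低bitLen位结果
--         """
--     mask = (1 << bitLen) - 1
--     lsb = din & mask
--     return lsb
--
-- def naiveConvModQ(a, b, q):
--     N = len(a)
--     res = list(0 for _ in range(N))
--     for i in range(N):
--         tmp = 0
--         for j in range(N):
--             if j <= i:
--                 tmp += (a[j] * b[i - j]) % q
--             else: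
--                 tmp -= (a[j] * b[N + i - j]) % q
--         tmp = getLowBits(tmp, 8)
--         if tmp >= q:
--             res[i] = tmp - (q << 1)
--         else:
--             res[i] = tmp
--
--     return res
-- ===== SOURCE B (Python) =====
-- def naiveConvModQ(a, b, q):
--     N = len(a)
--     if N == 0:
--         return []
--     full = [0] * (2 * N - 1)
--     for j in range(N):
--         aj = a[j]
--         for m in range(N):
--             full[j + m] += (aj * b[m]) % q
--     res = []
--     for i in range(N):
--         t = full[i] - (full[N + i] if N + i < 2 * N - 1 else 0)
--         t %= 256
--         res.append(t - (q << 1) if t >= q else t)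
--     return res
-- ===== Notes on version B (the rewrite author's own statement) =====
-- stated objective: alternative
-- what changed: B first builds the length-(2N-1) reduced-product table full[j+m] += (a[j]*b[m])%q with a plain polynomial-multiply double loop, then a separate pass computes each output as full[i] - full[N+i] (0 when out of range) followed by the mod-256 truncation and the >=q adjustment, replacing A's per-output inner loop that branches on j <= i.
import Mathlib
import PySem

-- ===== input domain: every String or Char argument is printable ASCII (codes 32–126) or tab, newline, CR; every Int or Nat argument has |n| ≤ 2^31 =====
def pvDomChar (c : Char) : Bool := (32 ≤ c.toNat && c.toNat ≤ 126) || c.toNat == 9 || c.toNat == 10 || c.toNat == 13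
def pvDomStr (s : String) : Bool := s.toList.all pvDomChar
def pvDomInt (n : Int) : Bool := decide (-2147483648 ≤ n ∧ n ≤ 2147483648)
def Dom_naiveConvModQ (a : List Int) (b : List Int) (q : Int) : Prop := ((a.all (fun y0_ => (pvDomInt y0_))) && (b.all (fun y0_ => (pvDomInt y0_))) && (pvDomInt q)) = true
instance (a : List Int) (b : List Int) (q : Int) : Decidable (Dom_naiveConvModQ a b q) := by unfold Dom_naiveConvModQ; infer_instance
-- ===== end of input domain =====

-- B replaces A's per-output negacyclic sum (inner branch on j <= i) by a plain polynomial-product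
-- table of length 2N-1 built once, followed by a separate pass taking full[i] - full[N+i];
-- objective: alternative decomposition (same integer accumulation, same asymptotic cost).


-- ===== PORT A =====
def getLowBitsL (din : Int) (bitLen : Nat) : Int :=
  let mask : Int := (1 <<< bitLen) - 1
  PySem.Int.band din mask

-- list indexing a[j], b[i-j], b[N+i-j] is ported with getD (indices are nonnegative and,
-- under Pre_, in range — exact there)
def naiveConvModQ (a : List Int) (b : List Int) (q : Int) : List Int :=
  let N := a.length
  (List.range N).foldl (fun res i =>
    let tmp := (List.range N).foldl (fun tmp j =>
      if j ≤ i then tmp + PySem.Int.mod (a.getD j 0 * b.getD (i - j) 0) q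
      else tmp - PySem.Int.mod (a.getD j 0 * b.getD (N + i - j) 0) q) 0
    let tmp2 := getLowBitsL tmp 8
    if tmp2 ≥ q then res.set i (tmp2 - (q <<< 1)) else res.set i tmp2)
    (List.replicate N 0)

-- ===== PORT B =====
def naiveConvModQ_alt (a : List Int) (b : List Int) (q : Int) : List Int :=
  let N := a.length
  if N = 0 then []
  else
    let full := (List.range N).foldl (fun fl j =>
      let aj := a.getD j 0
      (List.range N).foldl (fun fl2 m =>
        fl2.set (j + m) (fl2.getD (j + m) 0 + PySem.Int.mod (aj * b.getD m 0) q)) fl)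
      (List.replicate (2 * N - 1) 0)
    (List.range N).foldl (fun res i =>
      let t := full.getD i 0 - (if N + i < 2 * N - 1 then full.getD (N + i) 0 else 0)
      let t2 := PySem.Int.mod t 256
      res ++ [if t2 ≥ q then t2 - (q <<< 1) else t2]) []

-- ===== PRECONDITION & SPEC =====
-- Pre_ excludes exactly the inputs where the Python A raises: q = 0 (ZeroDivisionError on '% q')
-- and b shorter than a (IndexError on b[i-j]); both only reachable when a is nonempty.
def Pre_naiveConvModQ (a : List Int) (b : List Int) (q : Int) : Prop :=
  a = [] ∨ (q ≠ 0 ∧ a.length ≤ b.length)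
instance (a : List Int) (b : List Int) (q : Int) : Decidable (Pre_naiveConvModQ a b q) := by unfold Pre_naiveConvModQ; infer_instance
def pvWitness_naiveConvModQ : List Int × List Int × Int := ([1, 2], [3, 4], 5)
def Spec_naiveConvModQ (a : List Int) (b : List Int) (q : Int) (out : List Int) : Prop := out = naiveConvModQ_alt a b q
instance (a : List Int) (b : List Int) (q : Int) (out : List Int) : Decidable (Spec_naiveConvModQ a b q out) := by unfold Spec_naiveConvModQ; infer_instance

-- ===== CLAIM (what is proved, stated in full; the proofs are below) =====
def Claim_equal_naiveConvModQ : Prop := ∀ (a : List Int) (b : List Int) (q : Int), Dom_naiveConvModQ a b q → Pre_naiveConvModQ a b q → Spec_naiveConvModQ a b q (naiveConvModQ a b q)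

-- ===== LEMMAS AND PROOFS =====

-- the per-pair reduced product both programs accumulate
def pvT (a b : List Int) (q : Int) (j m : Nat) : Int :=
  PySem.Int.mod (a.getD j 0 * b.getD m 0) q

-- generic: a fold of "add f m at index p m" preserves length
theorem foldl_set_len (p : Nat → Nat) (f : Nat → Int) (l : List Nat) (fl : List Int) :
    (l.foldl (fun acc m => acc.set (p m) (acc.getD (p m) 0 + f m)) fl).length = fl.length := by
  induction l generalizing fl with
  | nil => rfl
  | cons m rest ih => rw [List.foldl_cons, ih, List.length_set]

-- generic: what such a fold leaves at an in-range index s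
theorem foldl_set_getD (p : Nat → Nat) (f : Nat → Int) (l : List Nat) (fl : List Int)
    (s : Nat) (hs : s < fl.length) :
    (l.foldl (fun acc m => acc.set (p m) (acc.getD (p m) 0 + f m)) fl).getD s 0
      = fl.getD s 0 + (l.map (fun m => if p m = s then f m else 0)).sum := by
  induction l generalizing fl with
  | nil => simp
  | cons m rest ih =>
      simp only [List.foldl_cons, List.map_cons, List.sum_cons]
      rw [ih _ (by rw [List.length_set]; exact hs)]
      have hstep : (fl.set (p m) (fl.getD (p m) 0 + f m)).getD s 0
          = fl.getD s 0 + (if p m = s then f m else 0) := by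
        rw [List.getD_eq_getElem _ _ (by rw [List.length_set]; exact hs),
            List.getElem_set, List.getD_eq_getElem _ _ hs]
        split
        · next h => rw [List.getD_eq_getElem _ _ (h ▸ hs)]; subst h; rfl
        · simp
      rw [hstep]; ring

theorem map_sum_sub (l : List Nat) (f g : Nat → Int) :
    (l.map f).sum - (l.map g).sum = (l.map (fun x => f x - g x)).sum := by
  induction l with
  | nil => simp
  | cons x r ih => simp only [List.map_cons, List.sum_cons]; rw [← ih]; ring

theorem range_ite_sum (f : Nat → Int) (j s : Nat) : ∀ (n : Nat),
    ((List.range n).map (fun m => if j + m = s then f m else 0)).sum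
      = if j ≤ s ∧ s - j < n then f (s - j) else 0 := by
  intro n
  induction n with
  | zero => simp
  | succ n ih =>
      rw [List.range_succ, List.map_append, List.sum_append, ih]
      simp only [List.map_cons, List.map_nil, List.sum_cons, List.sum_nil]
      by_cases h : j + n = s
      · have h1 : ¬ (j ≤ s ∧ s - j < n) := by omega
        have h2 : j ≤ s ∧ s - j < n + 1 := by omega
        have h3 : s - j = n := by omega
        rw [if_neg h1, if_pos h2, if_pos h, h3]; ring
      · by_cases h4 : j ≤ s ∧ s - j < n
        · rw [if_pos h4, if_pos (show j ≤ s ∧ s - j < n + 1 by omega), if_neg h]; ring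
        · rw [if_neg h4, if_neg (show ¬ (j ≤ s ∧ s - j < n + 1) by omega), if_neg h]; ring

-- the product table built by B's double loop, named for the proofs
def pvFull (a b : List Int) (q : Int) (N : Nat) : List Int :=
  (List.range N).foldl (fun fl j =>
    (List.range N).foldl (fun fl2 m =>
      fl2.set (j + m) (fl2.getD (j + m) 0 + pvT a b q j m)) fl)
    (List.replicate (2 * N - 1) 0)

theorem foldl_outer_getD (a b : List Int) (q : Int) (N : Nat) (l : List Nat) (s : Nat) :
    ∀ (fl : List Int), s < fl.length →
    (l.foldl (fun fl j => (List.range N).foldl (fun fl2 m =>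
      fl2.set (j + m) (fl2.getD (j + m) 0 + pvT a b q j m)) fl) fl).getD s 0
      = fl.getD s 0 + (l.map (fun j =>
          ((List.range N).map (fun m => if j + m = s then pvT a b q j m else 0)).sum)).sum := by
  induction l with
  | nil => intro fl _; simp
  | cons j rest ih =>
      intro fl hs
      rw [List.foldl_cons, ih _ (by
        rw [foldl_set_len (fun m => j + m) (fun m => pvT a b q j m)]; exact hs),
        foldl_set_getD (fun m => j + m) (fun m => pvT a b q j m) _ _ _ hs]
      simp only [List.map_cons, List.sum_cons]
      ring

theorem pvFull_getD (a b : List Int) (q : Int) (N : Nat) (s : Nat) (hs : s < 2 * N - 1) :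
    (pvFull a b q N).getD s 0
      = ((List.range N).map (fun j =>
          ((List.range N).map (fun m => if j + m = s then pvT a b q j m else 0)).sum)).sum := by
  unfold pvFull
  rw [foldl_outer_getD a b q N _ s _ (by rw [List.length_replicate]; exact hs)]
  rw [List.getD_eq_getElem _ _ (by rw [List.length_replicate]; exact hs)]
  simp

theorem band255 (t : Int) : PySem.Int.band t 255 = t % 256 := by
  unfold PySem.Int.band
  split
  · rw [if_pos (by norm_num)]
    have h : t.toNat &&& (255:Int).toNat = t.toNat % 256 := by
      have := Nat.and_two_pow_sub_one_eq_mod t.toNat 8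
      simpa using this
    rw [h]; omega
  · rw [if_pos (by norm_num)]
    have h : (255:Int).toNat &&& (-t - 1).toNat = (-t - 1).toNat % 256 := by
      rw [Nat.and_comm]
      have := Nat.and_two_pow_sub_one_eq_mod (-t - 1).toNat 8
      simpa using this
    rw [h]; omega

theorem getLowBits_eq_mod256 (t : Int) : getLowBitsL t 8 = PySem.Int.mod t 256 := by
  rw [PySem.Int.mod_eq_emod_of_pos (by norm_num)]
  unfold getLowBitsL
  rw [show (((1 <<< 8 : Nat) : Int) - 1) = 255 from by decide]
  exact band255 t

-- A's inner loop as a sum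
def pvTmp (a b : List Int) (q : Int) (N i : Nat) : Int :=
  ((List.range N).map (fun j =>
    if j ≤ i then pvT a b q j (i - j) else -(pvT a b q j (N + i - j)))).sum

-- the common per-output value
def pvOut (a b : List Int) (q : Int) (N i : Nat) : Int :=
  let tmp2 := getLowBitsL (pvTmp a b q N i) 8
  if tmp2 ≥ q then tmp2 - (q <<< 1) else tmp2

theorem inner_fold_eq (a b : List Int) (q : Int) (N i : Nat) :
    (List.range N).foldl (fun tmp j =>
      if j ≤ i then tmp + PySem.Int.mod (a.getD j 0 * b.getD (i - j) 0) q
      else tmp - PySem.Int.mod (a.getD j 0 * b.getD (N + i - j) 0) q) 0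
    = pvTmp a b q N i := by
  have hf : (fun (tmp : Int) (j : Nat) =>
      if j ≤ i then tmp + PySem.Int.mod (a.getD j 0 * b.getD (i - j) 0) q
      else tmp - PySem.Int.mod (a.getD j 0 * b.getD (N + i - j) 0) q)
      = (fun tmp j => tmp +
          (if j ≤ i then pvT a b q j (i - j) else -(pvT a b q j (N + i - j)))) := by
    funext tmp j
    by_cases h : j ≤ i
    · rw [if_pos h, if_pos h]; rfl
    · rw [if_neg h, if_neg h]; unfold pvT; ring
  rw [hf, PySem.List.foldl_add]
  unfold pvTmp; ring

theorem foldl_set_range_map (F : Nat → Int) (N : Nat) :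
    (List.range N).foldl (fun r i => r.set i (F i)) (List.replicate N 0) = (List.range N).map F := by
  have key : ∀ k, k ≤ N →
      (List.range k).foldl (fun r i => r.set i (F i)) (List.replicate N 0)
        = (List.range k).map F ++ List.replicate (N - k) 0 := by
    intro k
    induction k with
    | zero => intro _; simp
    | succ k ih =>
        intro hk
        rw [List.range_succ, List.foldl_append, ih (by omega), List.map_append]
        have hrep : List.replicate (N - k) (0:Int) = 0 :: List.replicate (N - (k + 1)) 0 := by
          rw [show N - k = (N - (k + 1)) + 1 by omega, List.replicate_succ]
        rw [hrep]
        simp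
  have := key N le_rfl
  simpa using this

theorem A_eq_map (a b : List Int) (q : Int) :
    naiveConvModQ a b q = (List.range a.length).map (pvOut a b q a.length) := by
  have h1 : naiveConvModQ a b q = (List.range a.length).foldl
      (fun r i => r.set i (pvOut a b q a.length i)) (List.replicate a.length 0) := by
    unfold naiveConvModQ
    apply PySem.List.foldl_congr_mem
    intro res i _
    show (let tmp := (List.range a.length).foldl (fun tmp j =>
        if j ≤ i then tmp + PySem.Int.mod (a.getD j 0 * b.getD (i - j) 0) q
        else tmp - PySem.Int.mod (a.getD j 0 * b.getD (a.length + i - j) 0) q) 0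
      let tmp2 := getLowBitsL tmp 8
      if tmp2 ≥ q then res.set i (tmp2 - (q <<< 1)) else res.set i tmp2)
      = res.set i (pvOut a b q a.length i)
    simp only [inner_fold_eq]
    rw [← apply_ite (res.set i)]
    rfl
  rw [h1, foldl_set_range_map]

theorem B_eq_map (a b : List Int) (q : Int) :
    naiveConvModQ_alt a b q = (List.range a.length).map (fun i =>
      let t := (pvFull a b q a.length).getD i 0 -
        (if a.length + i < 2 * a.length - 1 then (pvFull a b q a.length).getD (a.length + i) 0 else 0)
      let t2 := PySem.Int.mod t 256
      if t2 ≥ q then t2 - (q <<< 1) else t2) := by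
  unfold naiveConvModQ_alt
  by_cases h : a.length = 0
  · rw [if_pos h, h]; rfl
  · rw [if_neg h]
    show (List.range a.length).foldl (fun res i => res ++ [_]) [] = _
    rw [PySem.List.foldl_append_singleton_eq_map]
    rfl

theorem per_index (a b : List Int) (q : Int) (i : Nat) (hi : i < a.length) :
    pvOut a b q a.length i
      = (let t := (pvFull a b q a.length).getD i 0 -
          (if a.length + i < 2 * a.length - 1 then (pvFull a b q a.length).getD (a.length + i) 0 else 0)
         let t2 := PySem.Int.mod t 256
         if t2 ≥ q then t2 - (q <<< 1) else t2) := by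
  set N := a.length with hN
  have hfirst : (pvFull a b q N).getD i 0
      = ((List.range N).map (fun j => if j ≤ i then pvT a b q j (i - j) else 0)).sum := by
    rw [pvFull_getD a b q N i (by omega)]
    apply congrArg
    apply List.map_congr_left
    intro j hj
    rw [List.mem_range] at hj
    rw [range_ite_sum]
    by_cases h : j ≤ i
    · rw [if_pos (by omega), if_pos h]
    · rw [if_neg (by omega), if_neg h]
  have hsecond : (if N + i < 2 * N - 1 then (pvFull a b q N).getD (N + i) 0 else 0)
      = ((List.range N).map (fun j => if i < j then pvT a b q j (N + i - j) else 0)).sum := by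
    by_cases h : N + i < 2 * N - 1
    · rw [if_pos h, pvFull_getD a b q N (N + i) h]
      apply congrArg
      apply List.map_congr_left
      intro j hj
      rw [List.mem_range] at hj
      rw [range_ite_sum]
      by_cases h2 : i < j
      · rw [if_pos (by omega), if_pos h2]
      · rw [if_neg (by omega), if_neg h2]
    · rw [if_neg h]
      have : ((List.range N).map (fun j => if i < j then pvT a b q j (N + i - j) else 0)).sum
          = ((List.range N).map (fun _ => (0:Int))).sum := by
        apply congrArg
        apply List.map_congr_left
        intro j hj
        rw [List.mem_range] at hj
        rw [if_neg (by omega)]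
      rw [this]
      simp
  have ht : (pvFull a b q N).getD i 0 -
      (if N + i < 2 * N - 1 then (pvFull a b q N).getD (N + i) 0 else 0) = pvTmp a b q N i := by
    rw [hfirst, hsecond, map_sum_sub]
    unfold pvTmp
    apply congrArg
    apply List.map_congr_left
    intro j hj
    by_cases h : j ≤ i
    · rw [if_pos h, if_neg (by omega), if_pos h]; ring
    · rw [if_neg h, if_pos (by omega), if_neg h]; ring
  simp only [ht]
  unfold pvOut
  rw [getLowBits_eq_mod256]

-- ===== VERDICT (the statement is the Claim_ definition above) =====
theorem naiveConvModQ_spec : Claim_equal_naiveConvModQ := by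
  intro a b q _ _
  unfold Spec_naiveConvModQ
  rw [A_eq_map, B_eq_map]
  apply List.map_congr_left
  intro i hi
  rw [List.mem_range] at hi
  exact per_index a b q i hi
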